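-- pv_equiv track=rewrite | github.com/Anwarvic/BertPuncCap | utils.py | convert_to_full_tokens
-- ===== SOURCE A (Python) =====
-- def convert_to_full_tokens(subwords, punc_pred, case_pred):
--     i = 0
--     curr_word = ""
--     out_tokens, punc_preds, case_preds = [], [], []
--     while( i < len(subwords)):
--         curr_word += subwords[i]
--         while(i+1 < len(subwords) and subwords[i+1].startswith("##")):
--             i += 1
--             curr_word += subwords[i][2:]
--         out_tokens.append(curr_word)
--         punc_preds.append(punc_pred[i])
--         case_preds.append(case_pred[i])
--         curr_word = ""
--         i += 1
--     return out_tokens, punc_preds, case_preds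
-- ===== SOURCE B (Python) =====
-- def convert_to_full_tokens(subwords, punc_pred, case_pred):
--     n = len(subwords)
--     # word-start boundaries: index 0 always, plus every later non-'##' subword
--     bounds = [i for i in range(n) if i == 0 or not subwords[i].startswith("##")]
--     nexts = bounds[1:] + [n]
--     out_tokens, punc_preds, case_preds = [], [], []
--     for start, end in zip(bounds, nexts):
--         word = subwords[start] + "".join(s[2:] for s in subwords[start + 1:end])
--         out_tokens.append(word)
--         punc_preds.append(punc_pred[end - 1])
--         case_preds.append(case_pred[end - 1])
--     return out_tokens, punc_preds, case_preds
-- ===== Notes on version B (the rewrite author's own statement) =====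
-- stated objective: alternative
-- what changed: A walks the subword list with nested while loops accumulating each word character-run by index; B first builds the list of word-start boundary indices (0 plus every non-'##' position) in one pass, then forms each word and its predictions by slicing between consecutive boundaries.
import Mathlib
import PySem

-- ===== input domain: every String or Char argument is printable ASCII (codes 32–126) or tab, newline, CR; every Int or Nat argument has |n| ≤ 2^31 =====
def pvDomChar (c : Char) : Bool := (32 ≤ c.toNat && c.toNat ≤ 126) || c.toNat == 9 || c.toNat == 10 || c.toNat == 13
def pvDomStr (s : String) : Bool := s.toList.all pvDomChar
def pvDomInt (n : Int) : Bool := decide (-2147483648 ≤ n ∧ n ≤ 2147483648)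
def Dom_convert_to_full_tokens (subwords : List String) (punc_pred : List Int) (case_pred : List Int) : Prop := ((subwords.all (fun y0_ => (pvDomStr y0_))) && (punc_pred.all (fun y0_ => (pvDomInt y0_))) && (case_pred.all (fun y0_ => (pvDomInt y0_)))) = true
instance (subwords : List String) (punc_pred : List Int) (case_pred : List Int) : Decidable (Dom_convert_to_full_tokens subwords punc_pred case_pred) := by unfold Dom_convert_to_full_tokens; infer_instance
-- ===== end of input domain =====

-- B replaces A's nested index-walking whiles by a two-pass form (boundary indices, then one
-- segment per boundary pair); same return value, a different decomposition (no speed claim).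
-- ===== PORT A =====
-- shared helper: Python's  s[2:]  (both A and B use it)
def pvDrop2 (s : String) : String := PySem.Str.slice s (some 2) none

-- inner 'while' of A:  while i+1 < len(subwords) and subwords[i+1].startswith("##"): i += 1; curr_word += subwords[i][2:]
def ctfSkip (subwords : List String) (i : Nat) (curr : String) : Nat × String :=
  if _h : i + 1 < subwords.length ∧ PySem.Str.startswith (subwords[i+1]!) "##" then
    ctfSkip subwords (i + 1) (curr ++ pvDrop2 (subwords[i+1]!))
  else (i, curr)
termination_by subwords.length - i
decreasing_by omega

theorem ctfSkip_le (subwords : List String) (i : Nat) (curr : String) :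
    i ≤ (ctfSkip subwords i curr).1 := by
  fun_induction ctfSkip subwords i curr with
  | case1 i curr h ih => omega
  | case2 i curr h => simp

-- outer 'while' of A; the pred lookups use .getD 0: Python raises IndexError exactly where
-- pyGet? is none, and Pre_ excludes those inputs
def ctfLoop (subwords : List String) (punc_pred case_pred : List Int) (i : Nat)
    (out_tokens : List String) (punc_preds case_preds : List Int) :
    List String × List Int × List Int :=
  if _h : i < subwords.length then
    let r := ctfSkip subwords i (subwords[i]!)
    ctfLoop subwords punc_pred case_pred (r.1 + 1)
      (out_tokens ++ [r.2])
      (punc_preds ++ [(PySem.List.pyGet? punc_pred (r.1 : Int)).getD 0])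
      (case_preds ++ [(PySem.List.pyGet? case_pred (r.1 : Int)).getD 0])
  else (out_tokens, punc_preds, case_preds)
termination_by subwords.length - i
decreasing_by have := ctfSkip_le subwords i (subwords[i]!); omega

def convert_to_full_tokens (subwords : List String) (punc_pred : List Int) (case_pred : List Int) : List String × List Int × List Int :=
  ctfLoop subwords punc_pred case_pred 0 [] [] []

-- ===== PORT B =====
def convert_to_full_tokens_alt (subwords : List String) (punc_pred : List Int) (case_pred : List Int) : List String × List Int × List Int :=
  let n := subwords.length
  let bounds := (List.range n).filter (fun i => i == 0 || !(PySem.Str.startswith (subwords[i]!) "##"))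
  let nexts := bounds.drop 1 ++ [n]
  (bounds.zip nexts).foldl
    (fun acc se =>
      (acc.1 ++ [subwords[se.1]! ++ PySem.Str.join "" ((PySem.List.slice subwords (some ((se.1 : Int) + 1)) (some (se.2 : Int))).map pvDrop2)],
       acc.2.1 ++ [(PySem.List.pyGet? punc_pred ((se.2 : Int) - 1)).getD 0],
       acc.2.2 ++ [(PySem.List.pyGet? case_pred ((se.2 : Int) - 1)).getD 0]))
    ([], [], [])

-- ===== PRECONDITION & SPEC =====
-- Python A indexes punc_pred[i]/case_pred[i] up to i = len(subwords)-1 (always reached for the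
-- last word), so it raises IndexError exactly when either pred list is shorter than subwords.
def Pre_convert_to_full_tokens (subwords : List String) (punc_pred : List Int) (case_pred : List Int) : Prop :=
  subwords.length ≤ punc_pred.length ∧ subwords.length ≤ case_pred.length
instance (subwords : List String) (punc_pred : List Int) (case_pred : List Int) : Decidable (Pre_convert_to_full_tokens subwords punc_pred case_pred) := by unfold Pre_convert_to_full_tokens; infer_instance

def pvWitness_convert_to_full_tokens : List String × List Int × List Int :=
  (["he", "##llo", "world"], [0, 1, 2], [3, 4, 5])

def Spec_convert_to_full_tokens (subwords : List String) (punc_pred : List Int) (case_pred : List Int) (out : List String × List Int × List Int) : Prop := out = convert_to_full_tokens_alt subwords punc_pred case_pred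
instance (subwords : List String) (punc_pred : List Int) (case_pred : List Int) (out : List String × List Int × List Int) : Decidable (Spec_convert_to_full_tokens subwords punc_pred case_pred out) := by unfold Spec_convert_to_full_tokens; infer_instance

-- ===== CLAIM (what is proved, stated in full; the proofs are below) =====
def Claim_equal_convert_to_full_tokens : Prop := ∀ (subwords : List String) (punc_pred : List Int) (case_pred : List Int), Dom_convert_to_full_tokens subwords punc_pred case_pred → Pre_convert_to_full_tokens subwords punc_pred case_pred → Spec_convert_to_full_tokens subwords punc_pred case_pred (convert_to_full_tokens subwords punc_pred case_pred)

-- ===== LEMMAS AND PROOFS =====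

-- abbreviation for the subword-continuation test '##'-prefix
def pvP (s : String) : Bool := PySem.Str.startswith s "##"

-- Python's "".join splits off its first piece
theorem pvJoin_cons (a : String) (r : List String) :
    PySem.Str.join "" (a :: r) = a ++ PySem.Str.join "" r := by
  apply String.toList_inj.mp
  simp only [PySem.Str.join, String.toList_append, String.toList_ofList, List.map_cons]
  cases r with
  | nil => simp [PySem.Chars.join_singleton, PySem.Chars.join_nil]
  | cons b t =>
    rw [List.map_cons, PySem.Chars.join_cons_cons]
    simp

theorem pvJoin_nil : PySem.Str.join "" [] = "" := by
  apply String.toList_inj.mp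
  simp [PySem.Str.join, PySem.Chars.join_nil]

-- A's left-fold word accumulation equals B's head-plus-join form
theorem pvFoldl_drop2 (l : List String) (w : String) :
    List.foldl (fun a x => a ++ pvDrop2 x) w l = w ++ PySem.Str.join "" (l.map pvDrop2) := by
  induction l generalizing w with
  | nil => simp [pvJoin_nil]
  | cons x t ih =>
    rw [List.foldl_cons, ih, List.map_cons, pvJoin_cons, ← String.append_assoc]

-- characterisation of A's inner while loop
theorem ctfSkip_spec (s : List String) (i : Nat) (curr : String) :
    ctfSkip s i curr =
      (i + ((s.drop (i+1)).takeWhile pvP).length,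
       List.foldl (fun a x => a ++ pvDrop2 x) curr ((s.drop (i+1)).takeWhile pvP)) := by
  fun_induction ctfSkip s i curr with
  | case1 i curr h ih =>
    have h1 : i + 1 < s.length := h.1
    have hg : s[i+1]! = s[i+1] := getElem!_pos s (i+1) h1
    have hd : s.drop (i+1) = s[i+1] :: s.drop (i+2) := List.drop_eq_getElem_cons h1
    have hp : pvP (s[i+1]) = true := by rw [pvP, ← hg]; exact h.2
    rw [show i+1+1 = i+2 from rfl] at ih
    rw [ih, hd, List.takeWhile_cons_of_pos hp]
    simp [hg]
    omega
  | case2 i curr h =>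
    have hnil : (s.drop (i+1)).takeWhile pvP = [] := by
      by_cases h1 : i + 1 < s.length
      · have hg : s[i+1]! = s[i+1] := getElem!_pos s (i+1) h1
        have hd : s.drop (i+1) = s[i+1] :: s.drop (i+2) := List.drop_eq_getElem_cons h1
        have hp : pvP (s[i+1]) = false := by
          rw [pvP, ← hg]
          by_contra hc
          exact h ⟨h1, by simpa using hc⟩
        rw [hd, List.takeWhile_cons_of_neg (by simp [hp])]
      · rw [List.drop_eq_nil_of_le (by omega)]
        rfl
    simp [hnil]


-- one-step equations and accumulator-independence of A's outer loop
theorem ctfLoop_step (s : List String) (p c : List Int) (i : Nat)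
    (ot : List String) (pp cp : List Int) (hi : i < s.length) :
    ctfLoop s p c i ot pp cp =
      ctfLoop s p c ((ctfSkip s i (s[i]!)).1 + 1)
        (ot ++ [(ctfSkip s i (s[i]!)).2])
        (pp ++ [(PySem.List.pyGet? p (((ctfSkip s i (s[i]!)).1 : Nat) : Int)).getD 0])
        (cp ++ [(PySem.List.pyGet? c (((ctfSkip s i (s[i]!)).1 : Nat) : Int)).getD 0]) := by
  rw [ctfLoop, dif_pos hi]

theorem ctfLoop_stop (s : List String) (p c : List Int) (i : Nat)
    (ot : List String) (pp cp : List Int) (hi : ¬ i < s.length) :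
    ctfLoop s p c i ot pp cp = (ot, pp, cp) := by
  rw [ctfLoop, dif_neg hi]

theorem ctfLoop_acc (s : List String) (p c : List Int) :
    ∀ (n i : Nat) (ot : List String) (pp cp : List Int), s.length - i ≤ n →
      ctfLoop s p c i ot pp cp =
        (ot ++ (ctfLoop s p c i [] [] []).1,
         pp ++ (ctfLoop s p c i [] [] []).2.1,
         cp ++ (ctfLoop s p c i [] [] []).2.2) := by
  intro n
  induction n with
  | zero =>
    intro i ot pp cp hn
    have hi : ¬ i < s.length := by omega
    rw [ctfLoop_stop s p c i _ _ _ hi, ctfLoop_stop s p c i _ _ _ hi]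
    simp
  | succ n ih =>
    intro i ot pp cp hn
    by_cases hi : i < s.length
    · have hle := ctfSkip_le s i (s[i]!)
      rw [ctfLoop_step s p c i ot pp cp hi, ctfLoop_step s p c i [] [] [] hi]
      simp only [List.nil_append]
      rw [ih ((ctfSkip s i (s[i]!)).1 + 1) (ot ++ [(ctfSkip s i (s[i]!)).2]) _ _ (by omega),
          ih ((ctfSkip s i (s[i]!)).1 + 1) [(ctfSkip s i (s[i]!)).2] _ _ (by omega)]
      simp
    · rw [ctfLoop_stop s p c i _ _ _ hi, ctfLoop_stop s p c i _ _ _ hi]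
      simp


-- A's outer loop from index i is A on the i-th suffixes
theorem ctfLoop_shift :
    ∀ (n : Nat) (s : List String) (p c : List Int) (i : Nat), s.length - i ≤ n →
      ctfLoop s p c i [] [] [] =
        ctfLoop (s.drop i) (p.drop i) (c.drop i) 0 [] [] [] := by
  intro n
  induction n with
  | zero =>
    intro s p c i hn
    rw [ctfLoop_stop _ _ _ _ _ _ _ (by omega),
        ctfLoop_stop _ _ _ _ _ _ _ (by simp [List.length_drop]; omega)]
  | succ n ih =>
    intro s p c i hn
    by_cases hi : i < s.length
    · have hdl : (s.drop i).length = s.length - i := List.length_drop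
      have h0 : 0 < (s.drop i).length := by omega
      rw [ctfLoop_step _ _ _ _ _ _ _ hi, ctfLoop_step _ _ _ _ _ _ _ h0]
      rw [ctfSkip_spec, ctfSkip_spec]
      simp only [List.drop_drop, Nat.zero_add]
      have hhd : (s.drop i)[0]! = s[i]! := by
        simp [List.getElem!_eq_getElem?_getD, List.getElem?_drop]
      rw [hhd]
      rw [ctfLoop_acc s p c s.length _ _ _ _ (by omega),
          ctfLoop_acc (s.drop i) (p.drop i) (c.drop i) s.length _ _ _ _ (by omega)]
      rw [ih s p c _ (by omega), ih (s.drop i) (p.drop i) (c.drop i) _ (by omega)]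
      simp only [PySem.List.pyGet?_natCast]
      simp [List.drop_drop, List.getElem?_drop, Nat.add_comm, Nat.add_left_comm]
    · rw [ctfLoop_stop _ _ _ _ _ _ _ (by omega),
          ctfLoop_stop _ _ _ _ _ _ _ (by simp [List.length_drop]; omega)]

theorem pvTake_takeWhile (l : List String) (p : String → Bool) :
    l.take (l.takeWhile p).length = l.takeWhile p := by
  obtain ⟨r, hr⟩ := List.takeWhile_prefix (l := l) p
  set t := l.takeWhile p with ht
  rw [← hr, List.take_left]

theorem pvDrop_takeWhile (l : List String) (p : String → Bool) :
    l.drop (l.takeWhile p).length = l.dropWhile p := by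
  obtain ⟨r, hr⟩ := List.takeWhile_prefix (l := l) p
  have hd : r = l.dropWhile p := by
    have := List.takeWhile_append_dropWhile (p := p) (l := l)
    exact List.append_cancel_left (hr.trans this.symm)
  set t := l.takeWhile p with ht
  rw [← hd, ← hr, List.drop_left]

-- the one-word-per-iteration recurrence of A
theorem a_cons (w : String) (ws : List String) (p c : List Int) :
    convert_to_full_tokens (w :: ws) p c =
      ((w ++ PySem.Str.join "" ((ws.takeWhile pvP).map pvDrop2)) ::
         (convert_to_full_tokens (ws.dropWhile pvP)
            (p.drop ((ws.takeWhile pvP).length + 1))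
            (c.drop ((ws.takeWhile pvP).length + 1))).1,
       (PySem.List.pyGet? p ((ws.takeWhile pvP).length : Int)).getD 0 ::
         (convert_to_full_tokens (ws.dropWhile pvP)
            (p.drop ((ws.takeWhile pvP).length + 1))
            (c.drop ((ws.takeWhile pvP).length + 1))).2.1,
       (PySem.List.pyGet? c ((ws.takeWhile pvP).length : Int)).getD 0 ::
         (convert_to_full_tokens (ws.dropWhile pvP)
            (p.drop ((ws.takeWhile pvP).length + 1))
            (c.drop ((ws.takeWhile pvP).length + 1))).2.2) := by
  have h0 : 0 < (w :: ws).length := by simp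
  conv_lhs => rw [convert_to_full_tokens]
  rw [ctfLoop_step _ _ _ _ _ _ _ h0, ctfSkip_spec]
  have hhd : (w :: ws)[0]! = w := by simp
  have hdr : (w :: ws).drop (0+1) = ws := by simp
  rw [hhd, hdr]
  rw [ctfLoop_acc _ _ _ (w :: ws).length _ _ _ _ (by omega)]
  rw [ctfLoop_shift (w :: ws).length _ _ _ _ (by simp; omega)]
  rw [pvFoldl_drop2]
  have hds : (w :: ws).drop (0 + (ws.takeWhile pvP).length + 1) = ws.dropWhile pvP := by
    simp only [Nat.zero_add, List.drop_succ_cons]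
    exact pvDrop_takeWhile ws pvP
  rw [convert_to_full_tokens, hds]
  simp [PySem.List.pyGet?_natCast]

-- ---- B side ----

-- the non-'##' positions of a list
def pvIdxs (l : List String) : List Nat :=
  (List.range l.length).filter (fun i => !(pvP (l[i]!)))

theorem pvIdxs_cons (x : String) (l : List String) :
    pvIdxs (x :: l) = (if pvP x then [] else [0]) ++ (pvIdxs l).map (· + 1) := by
  unfold pvIdxs
  rw [List.length_cons, List.range_succ_eq_map, List.filter_cons, List.filter_map]
  simp only [Function.comp_def]
  have he : List.filter (fun i => !pvP ((x :: l)[i.succ]!)) (List.range l.length)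
      = List.filter (fun i => !pvP (l[i]!)) (List.range l.length) :=
    List.filter_congr (fun i _ => by simp [List.getElem!_eq_getElem?_getD])
  rw [he]
  by_cases hx : pvP x
  · simp [hx, List.getElem!_eq_getElem?_getD]
  · simp [hx, List.getElem!_eq_getElem?_getD]

theorem pvIdxs_append_all (pre post : List String) (h : ∀ x ∈ pre, pvP x) :
    pvIdxs (pre ++ post) = (pvIdxs post).map (· + pre.length) := by
  induction pre with
  | nil => simp
  | cons x t ih =>
    have hx : pvP x := h x (by simp)
    rw [List.cons_append, pvIdxs_cons, if_pos hx, List.nil_append,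
        ih (fun y hy => h y (by simp [hy])), List.map_map]
    simp only [List.length_cons]
    rfl

-- B's boundary list on a nonempty input
theorem pvBounds_cons (w : String) (ws : List String) :
    (List.range (w :: ws).length).filter
        (fun i => i == 0 || !(PySem.Str.startswith ((w :: ws)[i]!) "##")) =
      0 :: (pvIdxs ws).map (· + 1) := by
  rw [List.length_cons, List.range_succ_eq_map, List.filter_cons, List.filter_map]
  simp only [Function.comp_def]
  have he : List.filter (fun i => (i.succ == 0) || !(PySem.Str.startswith ((w :: ws)[i.succ]!) "##")) (List.range ws.length)
      = List.filter (fun i => !pvP (ws[i]!)) (List.range ws.length) :=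
    List.filter_congr (fun i _ => by simp [pvP, List.getElem!_eq_getElem?_getD])
  rw [he]
  simp [pvIdxs]

-- B's three-list fold in closed form
theorem pvFoldl3 {α : Type} (g1 : α → String) (g2 g3 : α → Int) (L : List α) :
    ∀ (a1 : List String) (a2 a3 : List Int),
      L.foldl (fun acc se => (acc.1 ++ [g1 se], acc.2.1 ++ [g2 se], acc.2.2 ++ [g3 se]))
          (a1, a2, a3) =
        (a1 ++ L.map g1, a2 ++ L.map g2, a3 ++ L.map g3) := by
  induction L with
  | nil => simp
  | cons x t ih =>
    intro a1 a2 a3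
    rw [List.foldl_cons]
    simp only
    rw [ih]
    simp

theorem pvDropWhile_head_false (p : String → Bool) (x : String) (xs : List String) :
    ∀ (l : List String), l.dropWhile p = x :: xs → p x = false := by
  intro l
  induction l with
  | nil => intro h; simp at h
  | cons y t ih =>
    intro h
    rw [List.dropWhile_cons] at h
    by_cases hy : p y
    · rw [if_pos hy] at h; exact ih h
    · rw [if_neg hy] at h
      injection h with h1 _
      rw [← h1]
      simpa using hy

def pvG1 (s : List String) (se : Nat × Nat) : String :=
  s[se.1]! ++ PySem.Str.join "" ((PySem.List.slice s (some ((se.1 : Int) + 1)) (some ((se.2 : Int)))).map pvDrop2)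
def pvG2 (p : List Int) (se : Nat × Nat) : Int := (PySem.List.pyGet? p ((se.2 : Int) - 1)).getD 0

-- B in closed map form
theorem alt_maps (s : List String) (p c : List Int) :
    convert_to_full_tokens_alt s p c =
      ((((List.range s.length).filter (fun i => i == 0 || !(PySem.Str.startswith (s[i]!) "##"))).zip
          ((((List.range s.length).filter (fun i => i == 0 || !(PySem.Str.startswith (s[i]!) "##"))).drop 1) ++ [s.length])).map (pvG1 s),
       (((List.range s.length).filter (fun i => i == 0 || !(PySem.Str.startswith (s[i]!) "##"))).zip
          ((((List.range s.length).filter (fun i => i == 0 || !(PySem.Str.startswith (s[i]!) "##"))).drop 1) ++ [s.length])).map (pvG2 p),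
       (((List.range s.length).filter (fun i => i == 0 || !(PySem.Str.startswith (s[i]!) "##"))).zip
          ((((List.range s.length).filter (fun i => i == 0 || !(PySem.Str.startswith (s[i]!) "##"))).drop 1) ++ [s.length])).map (pvG2 c)) := by
  rw [convert_to_full_tokens_alt]
  rw [pvFoldl3]
  simp only [List.nil_append]
  rfl

theorem pvG1_head (w : String) (ws : List String) (t : Nat) (ht : ws.take t = ws.takeWhile pvP) :
    pvG1 (w :: ws) (0, t + 1) = w ++ PySem.Str.join "" ((ws.takeWhile pvP).map pvDrop2) := by
  unfold pvG1
  have h1 : (w :: ws)[(0 : Nat)]! = w := by simp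
  have h2 : (((0 : Nat) : Int) + 1) = ((1 : Nat) : Int) := by norm_num
  rw [h1, h2, PySem.List.slice_natCast]
  have h3 : List.take (t + 1 - 1) (List.drop 1 (w :: ws)) = ws.takeWhile pvP := by
    simp [ht]
  rw [h3]

theorem pvG2_head (p : List Int) (t : Nat) :
    pvG2 p (0, t + 1) = (PySem.List.pyGet? p (t : Int)).getD 0 := by
  unfold pvG2
  have h : (((t + 1 : Nat) : Int) - 1) = (t : Int) := by push_cast; ring
  rw [h]

theorem pvG1_shift (w : String) (ws post : List String) (t : Nat)
    (hd : (w :: ws).drop (t + 1) = post) (a b : Nat) :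
    pvG1 (w :: ws) (a + t + 1, b + t + 1) = pvG1 post (a, b) := by
  unfold pvG1
  have h1 : (w :: ws)[(a + t + 1 : Nat)]! = post[(a : Nat)]! := by
    rw [List.getElem!_eq_getElem?_getD, List.getElem!_eq_getElem?_getD, ← hd,
        List.getElem?_drop]
    rw [show t + 1 + a = a + t + 1 from by omega]
  have h2 : (((a + t + 1 : Nat) : Int) + 1) = ((a + t + 2 : Nat) : Int) := by push_cast; ring
  have h3 : (((a : Nat) : Int) + 1) = ((a + 1 : Nat) : Int) := by push_cast; ring
  rw [h1, h2, h3, PySem.List.slice_natCast, PySem.List.slice_natCast]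
  have h4 : List.drop (a + t + 2) (w :: ws) = List.drop (a + 1) post := by
    rw [← hd, List.drop_drop]
    congr 1
    omega
  have h5 : b + t + 1 - (a + t + 2) = b - (a + 1) := by omega
  rw [h4, h5]

theorem pvG2_shift (p : List Int) (t : Nat) (a b : Nat) (hb : 1 ≤ b) :
    pvG2 p (a + t + 1, b + t + 1) = pvG2 (p.drop (t + 1)) (a, b) := by
  unfold pvG2
  have h1 : (((b + t + 1 : Nat) : Int) - 1) = ((b + t : Nat) : Int) := by push_cast; ring
  have h2 : (((b : Nat) : Int) - 1) = ((b - 1 : Nat) : Int) := by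
    rw [Nat.cast_sub hb]; simp
  rw [h1, h2, PySem.List.pyGet?_natCast, PySem.List.pyGet?_natCast, List.getElem?_drop]
  congr 2
  omega

theorem pvZip_shift (g : Nat → Nat) (J : List Nat) (pl : Nat) :
    ((0 :: (0 :: J).map g).zip ((0 :: J).map g ++ [g pl]))
      = (0, g 0) :: ((0 :: J).zip (J ++ [pl])).map (Prod.map g g) := by
  simp only [List.map_cons, List.cons_append, List.zip_cons_cons]
  congr 1
  calc (g 0 :: J.map g).zip (J.map g ++ [g pl])
      = ((0 :: J).map g).zip ((J ++ [pl]).map g) := by simp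
    _ = ((0 :: J).zip (J ++ [pl])).map (Prod.map g g) := List.zip_map

theorem alt_nil (p c : List Int) : convert_to_full_tokens_alt [] p c = ([], [], []) := rfl

-- the one-word-per-iteration recurrence of B (same right-hand side as a_cons, with B on the tail)
theorem alt_cons (w : String) (ws : List String) (p c : List Int) :
    convert_to_full_tokens_alt (w :: ws) p c =
      ((w ++ PySem.Str.join "" ((ws.takeWhile pvP).map pvDrop2)) ::
         (convert_to_full_tokens_alt (ws.dropWhile pvP)
            (p.drop ((ws.takeWhile pvP).length + 1))
            (c.drop ((ws.takeWhile pvP).length + 1))).1,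
       (PySem.List.pyGet? p ((ws.takeWhile pvP).length : Int)).getD 0 ::
         (convert_to_full_tokens_alt (ws.dropWhile pvP)
            (p.drop ((ws.takeWhile pvP).length + 1))
            (c.drop ((ws.takeWhile pvP).length + 1))).2.1,
       (PySem.List.pyGet? c ((ws.takeWhile pvP).length : Int)).getD 0 ::
         (convert_to_full_tokens_alt (ws.dropWhile pvP)
            (p.drop ((ws.takeWhile pvP).length + 1))
            (c.drop ((ws.takeWhile pvP).length + 1))).2.2) := by
  have hall : ∀ x ∈ ws.takeWhile pvP, pvP x := fun x hx => List.mem_takeWhile_imp hx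
  have hsplit : ws.takeWhile pvP ++ ws.dropWhile pvP = ws :=
    List.takeWhile_append_dropWhile
  have hIdx : pvIdxs ws = (pvIdxs (ws.dropWhile pvP)).map (· + (ws.takeWhile pvP).length) := by
    conv_lhs => rw [← hsplit]
    exact pvIdxs_append_all _ _ hall
  have htake : ws.take (ws.takeWhile pvP).length = ws.takeWhile pvP := pvTake_takeWhile ws pvP
  have hdropS : (w :: ws).drop ((ws.takeWhile pvP).length + 1) = ws.dropWhile pvP := by
    rw [List.drop_succ_cons]
    exact pvDrop_takeWhile ws pvP
  have hl := congrArg List.length hsplit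
  rw [List.length_append] at hl
  rw [alt_maps, alt_maps, pvBounds_cons, hIdx]
  cases hq : ws.dropWhile pvP with
  | nil =>
    rw [hq] at hl
    have hn : (w :: ws).length = (ws.takeWhile pvP).length + 1 := by
      simp only [List.length_cons, List.length_nil] at hl ⊢
      omega
    rw [hn]
    simp only [pvIdxs, List.length_nil, List.range_zero, List.filter_nil, List.map_nil]
    simp only [List.drop_one, List.tail_cons, List.tail_nil, List.nil_append,
      List.zip_cons_cons, List.zip_nil_right, List.zip_nil_left, List.map_cons, List.map_nil]
    rw [pvG1_head w ws _ htake, pvG2_head, pvG2_head]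
  | cons q post'' =>
    rw [hq] at hl hdropS
    have hqP : pvP q = false := pvDropWhile_head_false pvP q post'' ws hq
    rw [List.map_map, pvIdxs_cons q post'', if_neg (by simp [hqP]), List.singleton_append,
        pvBounds_cons q post'']
    simp only [List.drop_one, List.tail_cons]
    have hn : (w :: ws).length
        = ((fun x => x + 1) ∘ fun x => x + (ws.takeWhile pvP).length) ((q :: post'').length) := by
      simp only [Function.comp_apply, List.length_cons] at hl ⊢
      omega
    rw [hn, pvZip_shift ((fun x => x + 1) ∘ fun x => x + (ws.takeWhile pvP).length)
          ((pvIdxs post'').map (· + 1)) ((q :: post'').length)]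
    simp only [List.map_cons, List.map_map]
    have hg0 : ((fun x => x + 1) ∘ fun x => x + (ws.takeWhile pvP).length) 0
        = (ws.takeWhile pvP).length + 1 := by simp
    rw [hg0, pvG1_head w ws _ htake, pvG2_head, pvG2_head]
    simp only [Prod.mk.injEq, List.cons.injEq]
    refine ⟨⟨trivial, ?_⟩, ⟨trivial, ?_⟩, trivial, ?_⟩ <;>
    · apply List.map_congr_left
      rintro ⟨a, b⟩ hse
      obtain ⟨ha, hb⟩ := List.of_mem_zip hse
      have hb1 : 1 ≤ b := by
        rcases List.mem_append.mp hb with h | h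
        · obtain ⟨x, _, hx⟩ := List.mem_map.mp h; omega
        · simp at h; omega
      simp only [Function.comp_apply, Prod.map_apply]
      first
      | exact pvG1_shift w ws (q :: post'') (ws.takeWhile pvP).length hdropS a b
      | exact pvG2_shift p (ws.takeWhile pvP).length a b hb1
      | exact pvG2_shift c (ws.takeWhile pvP).length a b hb1

theorem pvMain (s : List String) (p c : List Int) :
    convert_to_full_tokens s p c = convert_to_full_tokens_alt s p c := by
  suffices h : ∀ (n : Nat) (s : List String) (p c : List Int), s.length ≤ n →
      convert_to_full_tokens s p c = convert_to_full_tokens_alt s p c from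
    h s.length s p c le_rfl
  intro n
  induction n with
  | zero =>
    intro s p c hn
    cases s with
    | nil =>
      rw [convert_to_full_tokens, ctfLoop_stop _ _ _ _ _ _ _ (by simp), alt_nil]
    | cons w ws => simp at hn
  | succ n ih =>
    intro s p c hn
    cases s with
    | nil =>
      rw [convert_to_full_tokens, ctfLoop_stop _ _ _ _ _ _ _ (by simp), alt_nil]
    | cons w ws =>
      rw [a_cons, alt_cons,
          ih (ws.dropWhile pvP) (p.drop ((ws.takeWhile pvP).length + 1))
            (c.drop ((ws.takeWhile pvP).length + 1))
            (by have := List.length_dropWhile_le pvP ws; simp at hn; omega)]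


-- ===== VERDICT (by name: the statement is the Claim_ definition above) =====
theorem convert_to_full_tokens_spec : Claim_equal_convert_to_full_tokens := by
  intro s p c _ _
  unfold Spec_convert_to_full_tokens
  exact pvMain s p c
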